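-- pv_equiv track=rewrite | github.com/abcde75163-stack/pnuth-newsletter | app.py | group_patents_by_category
-- ===== SOURCE A (Python) =====
-- def group_patents_by_category(patent_list):
--     grouped = {}
--     for patent in patent_list:
--         raw_cat = patent.get("category", "기타")
--         cat = raw_cat.replace(" ", "").replace("\n", "") if raw_cat else "기타"
--         if cat not in grouped: grouped[cat] = []
--         grouped[cat].append(patent)
--     return grouped
-- ===== SOURCE B (Python) =====
-- def group_patents_by_category(patent_list):
--     # Two-pass grouping: normalize every category once, collect the distinct
--     # categories in first-appearance order, then build each group by filtering.
--     def cat_of(p):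
--         raw = p.get("category", "기타")
--         return raw.replace(" ", "").replace("\n", "") if raw else "기타"
--     keyed = [(cat_of(p), p) for p in patent_list]
--     cats = list(dict.fromkeys(k for k, _ in keyed))
--     return {c: [p for k, p in keyed if k == c] for c in cats}
-- ===== Notes on version B (the rewrite author's own statement) =====
-- stated objective: alternative
-- what changed: A builds the groups in a single pass that mutates a dict entry per patent; B first computes the distinct normalized categories in first-appearance order (dict.fromkeys) and then builds each group by filtering the original list once per category.
import Mathlib
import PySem

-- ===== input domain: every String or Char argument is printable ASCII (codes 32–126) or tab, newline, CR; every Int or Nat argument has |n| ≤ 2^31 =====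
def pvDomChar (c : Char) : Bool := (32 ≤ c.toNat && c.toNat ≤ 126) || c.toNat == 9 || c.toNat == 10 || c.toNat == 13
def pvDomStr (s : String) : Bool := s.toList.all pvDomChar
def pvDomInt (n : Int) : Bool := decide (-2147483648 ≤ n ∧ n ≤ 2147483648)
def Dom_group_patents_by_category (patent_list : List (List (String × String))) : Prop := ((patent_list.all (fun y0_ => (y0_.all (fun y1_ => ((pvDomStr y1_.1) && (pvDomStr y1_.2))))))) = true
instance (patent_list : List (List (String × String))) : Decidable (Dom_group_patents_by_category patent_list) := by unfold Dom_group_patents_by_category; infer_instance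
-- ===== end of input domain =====

-- B groups by first collecting the distinct normalized categories and then filtering the
-- list once per category (alternative decomposition, same return value; not claimed faster).

-- ===== PORT A =====
-- normalized category of a patent, exactly as A computes it
def pvCatA (p : List (String × String)) : String :=
  let raw := (PySem.Dict.ofList p).getD "category" "기타"
  if raw ≠ "" then PySem.Str.replace (PySem.Str.replace raw " " "") "\n" "" else "기타"

def group_patents_by_category (patent_list : List (List (String × String))) : List (String × List (List (String × String))) :=
  (patent_list.foldl (fun grouped patent =>
      let cat := pvCatA patent
      let grouped := if grouped.contains cat then grouped
                     else grouped.insert cat ([] : List (List (String × String)))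
      grouped.insert cat (grouped.getD cat [] ++ [patent]))
    PySem.Dict.empty).items

-- ===== PORT B =====
-- B's key function (same normalization as A's)
def pvCatB (p : List (String × String)) : String :=
  let raw := (PySem.Dict.ofList p).getD "category" "기타"
  if raw ≠ "" then PySem.Str.replace (PySem.Str.replace raw " " "") "\n" "" else "기타"

def group_patents_by_category_alt (patent_list : List (List (String × String))) : List (String × List (List (String × String))) :=
  let keyed := patent_list.map (fun p => (pvCatB p, p))
  (PySem.List.dedup (keyed.map Prod.fst)).map
    (fun c => (c, (keyed.filter (fun q => q.1 == c)).map Prod.snd))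

-- ===== PRECONDITION & SPEC =====
def Spec_group_patents_by_category (patent_list : List (List (String × String))) (out : List (String × List (List (String × String)))) : Prop := out = group_patents_by_category_alt patent_list
instance (patent_list : List (List (String × String))) (out : List (String × List (List (String × String)))) : Decidable (Spec_group_patents_by_category patent_list out) := by unfold Spec_group_patents_by_category; infer_instance

-- ===== CLAIM (what is proved, stated in full; the proofs are below) =====
def Claim_equal_group_patents_by_category : Prop := ∀ (patent_list : List (List (String × String))), Dom_group_patents_by_category patent_list → Spec_group_patents_by_category patent_list (group_patents_by_category patent_list)

-- ===== LEMMAS AND PROOFS =====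

-- first-match lookup in a keyed map: if k occurs in l, find? returns (k, F k)
theorem pv_find?_map {β : Type} (F : String → β) (l : List String) (k : String) :
    k ∈ l → (l.map (fun c => (c, F c))).find? (fun q => q.1 == k) = some (k, F k) := by
  induction l with
  | nil => intro h; cases h
  | cons c t ih =>
    intro h
    by_cases hc : c = k
    · subst hc; simp
    · have ht : k ∈ t := by
        rcases List.mem_cons.mp h with h' | h'
        · exact absurd h'.symm hc
        · exact h'
      simp [hc, ih ht]

-- the dict built by A's fold: items are the dedup'd keys paired with the filtered groups
theorem pv_inv (xs : List (List (String × String))) :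
    (xs.foldl (fun grouped patent =>
        let cat := pvCatA patent
        let grouped := if grouped.contains cat then grouped
                       else grouped.insert cat ([] : List (List (String × String)))
        grouped.insert cat (grouped.getD cat [] ++ [patent]))
      PySem.Dict.empty).items
    = (PySem.List.dedup (xs.map pvCatA)).map
        (fun c => (c, xs.filter (fun p => pvCatA p == c))) := by
  induction xs using List.reverseRecOn with
  | nil => simp [PySem.List.dedup, PySem.Set.ofList, PySem.Dict.empty]
  | append_singleton xs p ih =>
    rw [List.foldl_append, List.foldl_cons, List.foldl_nil]
    set d := (xs.foldl (fun grouped patent =>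
        let cat := pvCatA patent
        let grouped := if grouped.contains cat then grouped
                       else grouped.insert cat ([] : List (List (String × String)))
        grouped.insert cat (grouped.getD cat [] ++ [patent]))
      PySem.Dict.empty) with hd
    have hL : PySem.List.dedup ((xs ++ [p]).map pvCatA)
        = if pvCatA p ∈ PySem.List.dedup (xs.map pvCatA)
          then PySem.List.dedup (xs.map pvCatA)
          else PySem.List.dedup (xs.map pvCatA) ++ [pvCatA p] := by
      simp only [PySem.List.dedup, PySem.Set.ofList, List.map_append, List.foldl_append,
        List.map_cons, List.map_nil, List.foldl_cons, List.foldl_nil]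
      by_cases hm : pvCatA p ∈ List.foldl PySem.Set.add PySem.Set.empty (xs.map pvCatA)
      · simp [PySem.Set.add, PySem.Set.contains]
      · simp [PySem.Set.add, PySem.Set.contains]
    have hcont : d.contains (pvCatA p) = true ↔ pvCatA p ∈ PySem.List.dedup (xs.map pvCatA) := by
      show d.items.any (fun q => q.1 == pvCatA p) = true ↔ _
      rw [ih, List.any_map]
      simp [Function.comp, List.any_eq_true]
    by_cases hm : pvCatA p ∈ PySem.List.dedup (xs.map pvCatA)
    · -- category already present
      have hc : d.contains (pvCatA p) = true := hcont.mpr hm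
      have hget : d.get? (pvCatA p)
          = some ((xs.filter (fun q => pvCatA q == pvCatA p))) := by
        show (d.items.find? (fun q => q.1 == pvCatA p)).map (fun x => x.2) = _
        rw [ih, pv_find?_map _ _ _ hm]
        rfl
      show ((if d.contains (pvCatA p) = true then d else d.insert (pvCatA p) []).insert (pvCatA p)
          (((if d.contains (pvCatA p) = true then d else d.insert (pvCatA p) []).getD (pvCatA p) []) ++ [p])).items = _
      rw [if_pos hc]
      rw [PySem.Dict.items_insert_of_contains d _ hc, ih, hL, if_pos hm,
        List.map_map]
      unfold PySem.Dict.getD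
      rw [hget]
      refine List.map_congr_left (fun c hcmem => ?_)
      by_cases hck : c = pvCatA p
      · subst hck
        simp [List.filter_append]
      · simp only [Function.comp]
        have h1 : (c == pvCatA p) = false := by simp [hck]
        have h2 : (pvCatA p == c) = false := by rw [beq_eq_false_iff_ne]; exact Ne.symm hck
        simp [h1, List.filter_append, h2]
    · -- new category
      have hc : d.contains (pvCatA p) = false := by
        cases h : d.contains (pvCatA p) with
        | false => rfl
        | true => exact absurd (hcont.mp h) hm
      have hnotxs : pvCatA p ∉ xs.map pvCatA := by
        rw [← PySem.List.mem_dedup]; exact hm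
      have hfilnil : xs.filter (fun q => pvCatA q == pvCatA p) = [] := by
        rw [List.filter_eq_nil_iff]
        intro q hq hbq
        exact hnotxs (by
          have : pvCatA q = pvCatA p := by simpa using hbq
          exact this ▸ List.mem_map_of_mem hq)
      show ((if d.contains (pvCatA p) = true then d else d.insert (pvCatA p) []).insert (pvCatA p)
          (((if d.contains (pvCatA p) = true then d else d.insert (pvCatA p) []).getD (pvCatA p) []) ++ [p])).items = _
      rw [if_neg (by simp [hc])]
      have hitems1 : (d.insert (pvCatA p) ([] : List (List (String × String)))).items
          = d.items ++ [(pvCatA p, [])] :=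
        PySem.Dict.items_insert_of_not_contains d _ hc
      have hc2 : (d.insert (pvCatA p) ([] : List (List (String × String)))).contains (pvCatA p) = true := by
        show List.any _ _ = true
        rw [hitems1]; simp
      have hget2 : (d.insert (pvCatA p) ([] : List (List (String × String)))).getD (pvCatA p) []
          = [] := by
        unfold PySem.Dict.getD PySem.Dict.get?
        rw [hitems1, ih]
        rw [List.find?_append]
        have : ((PySem.List.dedup (xs.map pvCatA)).map
            (fun c => (c, xs.filter (fun pp => pvCatA pp == c)))).find?
            (fun q => q.1 == pvCatA p) = none := by
          rw [List.find?_eq_none]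
          intro q hq
          rcases List.mem_map.mp hq with ⟨c, hcmem, rfl⟩
          intro hck
          exact hm ((eq_of_beq hck) ▸ hcmem)
        rw [this]
        simp [List.find?]
      rw [PySem.Dict.items_insert_of_contains _ _ hc2, hitems1, ih, hget2, hL, if_neg hm]
      rw [List.map_append, List.map_map, List.map_append]
      congr 1
      · refine List.map_congr_left (fun c hcmem => ?_)
        have hck : c ≠ pvCatA p := fun h => hm (h ▸ hcmem)
        have h1 : (c == pvCatA p) = false := by simp [hck]
        have h2 : (pvCatA p == c) = false := by rw [beq_eq_false_iff_ne]; exact Ne.symm hck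
        simp [Function.comp, h1, List.filter_append, h2]
      · simp [List.filter_append, hfilnil]

-- ===== VERDICT (by name: the statement is the Claim_ definition above) =====
theorem group_patents_by_category_spec : Claim_equal_group_patents_by_category := by
  intro patent_list _
  show group_patents_by_category patent_list = group_patents_by_category_alt patent_list
  unfold group_patents_by_category group_patents_by_category_alt
  have hAB : pvCatB = pvCatA := rfl
  rw [hAB]
  simp only [List.map_map, List.filter_map, Function.comp_def, List.map_id']
  exact pv_inv patent_list
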